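-- pv_equiv track=rewrite | github.com/Ayush-Chaudhary/GitSummarizer-RAG | backend/chunkers/base_chunker.py | _collect_unaccounted_lines
-- ===== SOURCE A (Python) =====
-- from typing import List, Dict, Tuple, Any, Optional
--
-- def _collect_unaccounted_lines(lines: List[str], accounted_lines: set) -> Optional[Dict]:
--     """
--     Collect any remaining unaccounted lines as 'other code'
--
--     Args:
--         lines: List of code lines
--         accounted_lines: Set of line numbers already accounted for
--
--     Returns:
--         Dictionary with start and end line numbers, or None if no unaccounted lines
--     """
--     unaccounted = []
--
--     for i in range(len(lines)):
--         if i not in accounted_lines and lines[i].strip():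
--             unaccounted.append(i)
--
--     if not unaccounted:
--         return None
--
--     # Group consecutive unaccounted lines
--     grouped = []
--     if unaccounted:
--         current_group = [unaccounted[0]]
--
--         for line in unaccounted[1:]:
--             if line == current_group[-1] + 1:
--                 current_group.append(line)
--             else:
--                 grouped.append(current_group)
--                 current_group = [line]
--
--         if current_group:
--             grouped.append(current_group)
--
--     # Combine all groups into one section
--     if grouped:
--         return {
--             'start': min(min(group) for group in grouped),
--             'end': max(max(group) for group in grouped)
--         }
--
--     return None
-- ===== SOURCE B (Python) =====
-- from typing import List, Dict, Optional
--
-- def _collect_unaccounted_lines(lines: List[str], accounted_lines: set) -> Optional[Dict]: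
--     """Two early-terminating scans: first qualifying index from the front, last from the back."""
--     def ok(i):
--         return i not in accounted_lines and lines[i].strip()
--     first = next((i for i in range(len(lines)) if ok(i)), None)
--     if first is None:
--         return None
--     last = next(i for i in range(len(lines) - 1, -1, -1) if ok(i))
--     return {'start': first, 'end': last}
-- ===== Notes on version B (the rewrite author's own statement) =====
-- stated objective: simpler
-- what changed: Replaces collecting all unaccounted indices and grouping consecutive runs (then min-of-mins/max-of-maxes) with two early-terminating scans: first qualifying index from the front, last qualifying index from the back.
import Mathlib
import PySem

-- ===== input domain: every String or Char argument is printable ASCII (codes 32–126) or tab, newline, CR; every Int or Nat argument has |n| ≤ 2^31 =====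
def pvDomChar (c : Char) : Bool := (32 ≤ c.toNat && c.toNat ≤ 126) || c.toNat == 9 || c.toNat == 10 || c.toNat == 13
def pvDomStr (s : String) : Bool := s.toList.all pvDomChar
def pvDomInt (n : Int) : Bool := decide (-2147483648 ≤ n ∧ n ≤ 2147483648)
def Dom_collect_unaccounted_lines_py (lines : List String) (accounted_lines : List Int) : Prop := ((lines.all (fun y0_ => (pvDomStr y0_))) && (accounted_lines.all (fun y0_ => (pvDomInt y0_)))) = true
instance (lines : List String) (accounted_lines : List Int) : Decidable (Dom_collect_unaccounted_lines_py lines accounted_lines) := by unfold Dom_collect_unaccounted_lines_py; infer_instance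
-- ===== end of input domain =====

-- B replaces A's collect-then-group-then-min/max pipeline by two early-terminating scans
-- (first qualifying index from the front, last from the back); objective: simpler.

-- ===== PORT A =====
-- step of A's "group consecutive unaccounted lines" loop (state = (grouped, current_group));
-- current_group[-1] is ported with a .getD 0 totality default (current_group is never empty when read)
def pvGroupStep (st : List (List Int) × List Int) (line : Int) : List (List Int) × List Int :=
  if line = st.2.getLast?.getD 0 + 1 then (st.1, st.2 ++ [line])
  else (st.1 ++ [st.2], [line])

def collect_unaccounted_lines_py (lines : List String) (accounted_lines : List Int) : Option (List (String × Int)) :=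
  let unaccounted : List Int :=
    (PySem.List.pyRange 0 lines.length 1).foldl (fun acc i =>
      if !accounted_lines.contains i && (PySem.Str.strip (PySem.List.pyGetD lines i "") != "") then acc ++ [i] else acc) []
  match unaccounted with
  | [] => none
  | u0 :: rest =>
    let st := rest.foldl pvGroupStep ([], [u0])
    let grouped := if st.2.isEmpty then st.1 else st.1 ++ [st.2]
    match grouped with
    | [] => none
    | _ :: _ =>
      -- min/max of a (always nonempty) group ported with a .getD 0 totality default
      some [("start", (PySem.List.min? (grouped.map (fun g => (PySem.List.min? g (fun x => x)).getD 0)) (fun x => x)).getD 0),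
            ("end",   (PySem.List.max? (grouped.map (fun g => (PySem.List.max? g (fun x => x)).getD 0)) (fun x => x)).getD 0)]

-- ===== PORT B =====
def pvOk (lines : List String) (accounted_lines : List Int) (i : Int) : Bool :=
  !accounted_lines.contains i && (PySem.Str.strip (PySem.List.pyGetD lines i "") != "")

def collect_unaccounted_lines_py_alt (lines : List String) (accounted_lines : List Int) : Option (List (String × Int)) :=
  match (PySem.List.pyRange 0 lines.length 1).find? (pvOk lines accounted_lines) with
  | none => none
  | some first =>
    match (PySem.List.pyRange ((lines.length : Int) - 1) (-1) (-1)).find? (pvOk lines accounted_lines) with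
    | none => none   -- unreachable: the forward scan already found a qualifying index
    | some last => some [("start", first), ("end", last)]

-- ===== PRECONDITION & SPEC =====
def Spec_collect_unaccounted_lines_py (lines : List String) (accounted_lines : List Int) (out : Option (List (String × Int))) : Prop := out = collect_unaccounted_lines_py_alt lines accounted_lines
instance (lines : List String) (accounted_lines : List Int) (out : Option (List (String × Int))) : Decidable (Spec_collect_unaccounted_lines_py lines accounted_lines out) := by unfold Spec_collect_unaccounted_lines_py; infer_instance

-- ===== CLAIM (what is proved, stated in full; the proofs are below) =====
def Claim_equal_collect_unaccounted_lines_py : Prop := ∀ (lines : List String) (accounted_lines : List Int), Dom_collect_unaccounted_lines_py lines accounted_lines → Spec_collect_unaccounted_lines_py lines accounted_lines (collect_unaccounted_lines_py lines accounted_lines)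

-- ===== LEMMAS AND PROOFS =====

-- find? = head of filter
theorem pv_find?_eq_head?_filter {α : Type} (p : α → Bool) (l : List α) :
    l.find? p = (l.filter p).head? := by rw [List.head?_filter]

-- the grouping fold: current group stays nonempty, every emitted group is nonempty,
-- and the concatenation of all groups is exactly the input consumed so far
theorem pv_group_invariant (l : List Int) :
    ∀ (g : List (List Int)) (c : List Int), c ≠ [] → (∀ x ∈ g, x ≠ []) →
    (l.foldl pvGroupStep (g, c)).2 ≠ [] ∧
    (∀ x ∈ (l.foldl pvGroupStep (g, c)).1, x ≠ []) ∧
    ((l.foldl pvGroupStep (g, c)).1 ++ [(l.foldl pvGroupStep (g, c)).2]).flatten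
      = (g ++ [c]).flatten ++ l := by
  induction l with
  | nil => intro g c hc hg; simpa using ⟨hc, hg⟩
  | cons a t ih =>
    intro g c hc hg
    simp only [List.foldl_cons, pvGroupStep]
    split
    · have h := ih g (c ++ [a]) (by simp) hg
      refine ⟨h.1, h.2.1, ?_⟩
      rw [h.2.2]; simp
    · have hg' : ∀ x ∈ g ++ [c], x ≠ [] := by
        intro x hx
        rcases List.mem_append.1 hx with h' | h'
        · exact hg x h'
        · simp at h'; subst h'; exact hc
      have h := ih (g ++ [c]) [a] (by simp) hg'
      refine ⟨h.1, h.2.1, ?_⟩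
      rw [h.2.2]; simp

-- foldl min pulls out of the accumulator
theorem pv_foldl_min_comm (l : List Int) : ∀ (a b : Int),
    min a (l.foldl min b) = l.foldl min (min a b) := by
  induction l with
  | nil => intro a b; simp
  | cons h t ih =>
    intro a b
    simp only [List.foldl_cons]
    rw [ih a (min b h), min_assoc]

theorem pv_foldl_max_comm (l : List Int) : ∀ (a b : Int),
    max a (l.foldl max b) = l.foldl max (max a b) := by
  induction l with
  | nil => intro a b; simp
  | cons h t ih =>
    intro a b
    simp only [List.foldl_cons]
    rw [ih a (max b h), max_assoc]

-- min over the per-group minima = min over the concatenation (all groups nonempty)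
theorem pv_foldl_min_map (gs : List (List Int)) :
    ∀ (x : Int), (∀ g ∈ gs, g ≠ []) →
    (gs.map (fun g => (PySem.List.min? g (fun y => y)).getD 0)).foldl min x
      = gs.flatten.foldl min x := by
  induction gs with
  | nil => intro x _; simp
  | cons g gs' ih =>
    intro x hne
    obtain ⟨y, t, rfl⟩ := List.exists_cons_of_ne_nil (hne g (by simp))
    simp only [List.map_cons, List.foldl_cons, List.flatten_cons,
      PySem.List.min?_id_cons, Option.getD_some, List.foldl_append]
    rw [ih _ (fun g hg => hne g (by simp [hg])), pv_foldl_min_comm]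

theorem pv_foldl_max_map (gs : List (List Int)) :
    ∀ (x : Int), (∀ g ∈ gs, g ≠ []) →
    (gs.map (fun g => (PySem.List.max? g (fun y => y)).getD 0)).foldl max x
      = gs.flatten.foldl max x := by
  induction gs with
  | nil => intro x _; simp
  | cons g gs' ih =>
    intro x hne
    obtain ⟨y, t, rfl⟩ := List.exists_cons_of_ne_nil (hne g (by simp))
    simp only [List.map_cons, List.foldl_cons, List.flatten_cons,
      PySem.List.max?_id_cons, Option.getD_some, List.foldl_append]
    rw [ih _ (fun g hg => hne g (by simp [hg])), pv_foldl_max_comm]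

-- on a strictly increasing list the running min is the head …
theorem pv_foldl_min_sorted (rest : List Int) (u0 : Int)
    (h : ∀ x ∈ rest, u0 ≤ x) : rest.foldl min u0 = u0 := by
  induction rest with
  | nil => rfl
  | cons a t ih =>
    simp only [List.foldl_cons]
    rw [min_eq_left (h a (by simp))]
    exact ih (fun x hx => h x (by simp [hx]))

-- … and the running max is the last element
theorem pv_foldl_max_sorted (rest : List Int) :
    ∀ (u0 : Int), (u0 :: rest).Pairwise (· < ·) →
    rest.foldl max u0 = (u0 :: rest).getLast (by simp) := by
  induction rest with
  | nil => intro u0 _; rfl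
  | cons a t ih =>
    intro u0 hp
    simp only [List.foldl_cons]
    have h01 : u0 < a := (List.pairwise_cons.1 hp).1 a (by simp)
    rw [max_eq_right h01.le]
    have := ih a (List.pairwise_cons.1 hp).2
    rw [this]
    simp [List.getLast_cons]

theorem pv_getLast?_filter_reverse {α : Type} (p : α → Bool) (l : List α) :
    l.reverse.find? p = (l.filter p).getLast? := by
  rw [pv_find?_eq_head?_filter, List.filter_reverse, List.head?_reverse]


-- ===== VERDICT (by name: the statement is the Claim_ definition above) =====
theorem collect_unaccounted_lines_py_spec : Claim_equal_collect_unaccounted_lines_py := by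
  intro lines accounted_lines _
  unfold Spec_collect_unaccounted_lines_py collect_unaccounted_lines_py collect_unaccounted_lines_py_alt
  have hpred : (fun (acc : List Int) (i : Int) =>
      if !accounted_lines.contains i && (PySem.Str.strip (PySem.List.pyGetD lines i "") != "") then acc ++ [i] else acc)
      = fun acc i => if pvOk lines accounted_lines i then acc ++ [i] else acc := by
    funext acc i; simp [pvOk]
  rw [hpred, PySem.List.foldl_append_if_eq_filter]
  rw [pv_find?_eq_head?_filter]
  have hrev : PySem.List.pyRange ((lines.length : Int) - 1) (-1) (-1)
      = (PySem.List.pyRange 0 (lines.length : Int) 1).reverse := by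
    rw [PySem.List.pyRange_neg_one_eq_reverse]; norm_num
  rw [hrev, pv_getLast?_filter_reverse]
  set u := (PySem.List.pyRange 0 (lines.length : Int) 1).filter (pvOk lines accounted_lines) with hu
  have hsorted : u.Pairwise (· < ·) :=
    (PySem.List.pairwise_lt_pyRange_one 0 (lines.length : Int)).filter _
  simp only [List.nil_append]
  match hcase : u with
  | [] => simp
  | u0 :: rest =>
    have hinv := pv_group_invariant rest [] [u0] (by simp) (by simp)
    set st := rest.foldl pvGroupStep ([], [u0]) with hst
    have hc : st.2.isEmpty = false := by
      cases h2 : st.2 with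
      | nil => exact absurd h2 hinv.1
      | cons a l => rfl
    simp only [hc]
    have hflat : (st.1 ++ [st.2]).flatten = u0 :: rest := by
      rw [hinv.2.2]; simp
    have hne : ∀ g ∈ st.1 ++ [st.2], g ≠ [] := by
      intro g hg
      rcases List.mem_append.1 hg with h' | h'
      · exact hinv.2.1 g h'
      · simp at h'; rw [h']; exact hinv.1
    -- the grouped list is nonempty (its flatten is)
    match hgr : st.1 ++ [st.2] with
    | [] => rw [hgr] at hflat; simp at hflat
    | g :: gs =>
      rw [hgr] at hflat hne
      obtain ⟨y, t, rfl⟩ := List.exists_cons_of_ne_nil (hne g (by simp))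
      simp only [List.flatten_cons, List.cons_append] at hflat
      obtain ⟨h0, hrest⟩ := List.cons_eq_cons.mp hflat
      subst h0
      have hgsne : ∀ g' ∈ gs, g' ≠ [] := fun g' hg' => hne g' (by simp [hg'])
      have hle : ∀ x ∈ rest, y ≤ x := fun x hx =>
        ((List.pairwise_cons.1 hsorted).1 x hx).le
      have hlast : (y :: rest).getLast? = some ((y :: rest).getLast (by simp)) :=
        List.getLast?_eq_some_getLast _
      rw [← hst]
      simp only [hc, Bool.false_eq_true, if_false, List.map_cons,
        PySem.List.min?_id_cons, PySem.List.max?_id_cons, Option.getD_some,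
        List.head?_cons, hlast]
      rw [pv_foldl_min_map gs _ hgsne, pv_foldl_max_map gs _ hgsne,
        ← List.foldl_append, ← List.foldl_append, hrest,
        pv_foldl_min_sorted rest y hle, pv_foldl_max_sorted rest y hsorted]
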